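-- pv_equiv track=rewrite | github.com/StarSein/BaekJoon | 백준/Gold/13334. 철로/철로.py | solution
-- ===== SOURCE A (Python) =====
-- from collections import deque
-- from typing import List, Tuple
--
-- def solution(n: int, pairs: List[Tuple[int, int]], d: int) -> int:
--     pos_list = []
--     s_list = []
--     e_list = []
--     for s, e in pairs:
--         if s > e:
--             s, e = e, s
--         if e - s > d:
--             continue
--         pos_list.append(s)
--         pos_list.append(e)
--         s_list.append(s)
--         e_list.append(e)
--     pos_list.sort()
--     s_list.sort()
--     e_list.sort()
--     dq_s = deque(s_list)
--     dq_e = deque(e_list)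
--
--     answer = 0
--     cnt = 0
--     for pos in pos_list:
--         while dq_e and dq_e[0] <= pos + d:
--             dq_e.popleft()
--             cnt += 1
--         while dq_s and dq_s[0] < pos:
--             dq_s.popleft()
--             cnt -= 1
--         answer = max(answer, cnt)
--     return answer
-- ===== SOURCE B (Python) =====
-- from typing import List, Tuple
--
-- def solution(n: int, pairs: List[Tuple[int, int]], d: int) -> int:
--     # normalize and keep only intervals that can fit a window of length d
--     kept = []
--     for a, b in pairs:
--         s, e = (b, a) if a > b else (a, b)
--         if e - s <= d:
--             kept.append((s, e))
--     # a best window can always be anchored at some interval's start: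
--     # count intervals fully inside [s, s+d] for each start s
--     best = 0
--     for s, _ in kept:
--         c = 0
--         for s2, e2 in kept:
--             if s <= s2 and e2 <= s + d:
--                 c += 1
--         if c > best:
--             best = c
--     return best
-- ===== Notes on version B (the rewrite author's own statement) =====
-- stated objective: alternative
-- what changed: Replaces A's sort-plus-dual-deque sweep over all 2k endpoints with a direct brute-force maximisation: anchor the window at each kept interval's start and count intervals contained in [s, s+d] (no sorting, no deques).
import Mathlib
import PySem

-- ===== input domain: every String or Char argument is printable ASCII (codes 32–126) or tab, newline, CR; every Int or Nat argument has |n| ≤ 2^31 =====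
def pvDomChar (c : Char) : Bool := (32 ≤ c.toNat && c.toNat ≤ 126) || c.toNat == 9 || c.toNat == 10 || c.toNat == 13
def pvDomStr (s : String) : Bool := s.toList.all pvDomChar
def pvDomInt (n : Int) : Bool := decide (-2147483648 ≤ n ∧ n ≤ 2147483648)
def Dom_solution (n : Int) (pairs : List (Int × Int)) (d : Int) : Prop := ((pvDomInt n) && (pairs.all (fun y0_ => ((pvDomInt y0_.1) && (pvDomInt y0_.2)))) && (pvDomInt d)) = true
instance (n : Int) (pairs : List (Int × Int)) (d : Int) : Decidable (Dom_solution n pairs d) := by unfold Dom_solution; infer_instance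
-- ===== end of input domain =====

-- B replaces A's sort-plus-dual-deque sweep over all endpoints with a direct
-- maximisation anchored at each kept interval's start (alternative algorithm, no sorting).


-- ===== PORT A =====
-- while dq_e and dq_e[0] <= pos + d: dq_e.popleft(); cnt += 1
def popE : List Int → Int → Int → List Int × Int
  | [], _, cnt => ([], cnt)
  | x :: xs, t, cnt => if x ≤ t then popE xs t (cnt + 1) else (x :: xs, cnt)

-- while dq_s and dq_s[0] < pos: dq_s.popleft(); cnt -= 1
def popS : List Int → Int → Int → List Int × Int
  | [], _, cnt => ([], cnt)
  | x :: xs, p, cnt => if x < p then popS xs p (cnt - 1) else (x :: xs, cnt)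

-- state: (dq_s, dq_e, answer, cnt)
def stepA (d : Int) (st : List Int × List Int × Int × Int) (pos : Int) : List Int × List Int × Int × Int :=
  let r1 := popE st.2.1 (pos + d) st.2.2.2
  let r2 := popS st.1 pos r1.2
  (r2.1, r1.1, max st.2.2.1 r2.2, r2.2)

-- body of the first loop, building (pos_list, s_list, e_list)
def buildStep (d : Int) (acc : List Int × List Int × List Int) (p : Int × Int) : List Int × List Int × List Int :=
  let s := if p.1 > p.2 then p.2 else p.1
  let e := if p.1 > p.2 then p.1 else p.2
  if e - s > d then acc
  else (acc.1 ++ [s, e], acc.2.1 ++ [s], acc.2.2 ++ [e])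

def solution (n : Int) (pairs : List (Int × Int)) (d : Int) : Int :=
  let lists := pairs.foldl (buildStep d) ([], [], [])
  let pos_list := PySem.List.sorted lists.1 (fun x => x) false
  let dq_s := PySem.List.sorted lists.2.1 (fun x => x) false
  let dq_e := PySem.List.sorted lists.2.2 (fun x => x) false
  (pos_list.foldl (stepA d) (dq_s, dq_e, 0, 0)).2.2.1

-- ===== PORT B =====
def keepStep (d : Int) (acc : List (Int × Int)) (p : Int × Int) : List (Int × Int) :=
  let q := if p.1 > p.2 then (p.2, p.1) else (p.1, p.2)
  if q.2 - q.1 ≤ d then acc ++ [q] else acc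

def solution_alt (n : Int) (pairs : List (Int × Int)) (d : Int) : Int :=
  let kept := pairs.foldl (keepStep d) []
  kept.foldl (fun best q =>
      let c := kept.foldl (fun (c : Int) q2 => if q.1 ≤ q2.1 ∧ q2.2 ≤ q.1 + d then c + 1 else c) 0
      if c > best then c else best) 0

-- ===== PRECONDITION & SPEC =====
def Spec_solution (n : Int) (pairs : List (Int × Int)) (d : Int) (out : Int) : Prop := out = solution_alt n pairs d
instance (n : Int) (pairs : List (Int × Int)) (d : Int) (out : Int) : Decidable (Spec_solution n pairs d out) := by unfold Spec_solution; infer_instance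

-- ===== CLAIM (what is proved, stated in full; the proofs are below) =====
def Claim_equal_solution : Prop := ∀ (n : Int) (pairs : List (Int × Int)) (d : Int), Dom_solution n pairs d → Spec_solution n pairs d (solution n pairs d)

-- ===== LEMMAS AND PROOFS =====

-- the kept, normalized intervals
def keptL (pairs : List (Int × Int)) (d : Int) : List (Int × Int) :=
  pairs.filterMap (fun p =>
    let q := if p.1 > p.2 then (p.2, p.1) else (p.1, p.2)
    if q.2 - q.1 ≤ d then some q else none)

-- the contained-in-[pos, pos+d] count
def gcount (L : List (Int × Int)) (d pos : Int) : Int :=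
  (L.countP (fun q => decide (pos ≤ q.1 ∧ q.2 ≤ pos + d)) : Int)

lemma mem_keptL {pairs : List (Int × Int)} {d : Int} {q : Int × Int}
    (h : q ∈ keptL pairs d) : q.1 ≤ q.2 ∧ q.2 - q.1 ≤ d := by
  rcases List.mem_filterMap.mp h with ⟨p, _, hp⟩
  by_cases h12 : p.1 > p.2 <;> simp [h12] at hp <;> rcases hp with ⟨h1, h2⟩ <;>
    subst h2 <;> constructor <;> (first | omega | (simp; omega))

lemma buildStep_eq (d : Int) (a b c : List Int) (p : Int × Int) :
    buildStep d (a, b, c) p =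
      if (if p.1 > p.2 then (p.2, p.1) else (p.1, p.2)).2 -
          (if p.1 > p.2 then (p.2, p.1) else (p.1, p.2)).1 ≤ d
      then (a ++ [(if p.1 > p.2 then (p.2, p.1) else (p.1, p.2)).1,
                  (if p.1 > p.2 then (p.2, p.1) else (p.1, p.2)).2],
            b ++ [(if p.1 > p.2 then (p.2, p.1) else (p.1, p.2)).1],
            c ++ [(if p.1 > p.2 then (p.2, p.1) else (p.1, p.2)).2])
      else (a, b, c) := by
  by_cases h12 : p.1 > p.2 <;> simp only [buildStep, h12, if_true, if_false] <;>
    split_ifs <;> (first | rfl | omega)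

lemma buildA (d : Int) : ∀ (pairs : List (Int × Int)) (a b c : List Int),
    pairs.foldl (buildStep d) (a, b, c)
      = (a ++ (keptL pairs d).flatMap (fun q => [q.1, q.2]),
         b ++ (keptL pairs d).map Prod.fst,
         c ++ (keptL pairs d).map Prod.snd) := by
  intro pairs
  induction pairs with
  | nil => intro a b c; simp [keptL]
  | cons p rest ih =>
    intro a b c
    simp only [List.foldl_cons, buildStep_eq d a b c p]
    by_cases hd : (if p.1 > p.2 then (p.2, p.1) else (p.1, p.2)).2 -
        (if p.1 > p.2 then (p.2, p.1) else (p.1, p.2)).1 ≤ d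
    · rw [if_pos hd, ih]
      simp only [keptL, List.filterMap_cons, if_pos hd]
      simp
    · rw [if_neg hd, ih]
      simp only [keptL, List.filterMap_cons, if_neg hd]

lemma buildB (d : Int) : ∀ (pairs : List (Int × Int)) (acc : List (Int × Int)),
    pairs.foldl (keepStep d) acc = acc ++ keptL pairs d := by
  intro pairs
  induction pairs with
  | nil => intro acc; simp [keptL]
  | cons p rest ih =>
    intro acc
    rw [List.foldl_cons]
    by_cases hd : (if p.1 > p.2 then (p.2, p.1) else (p.1, p.2)).2 -
        (if p.1 > p.2 then (p.2, p.1) else (p.1, p.2)).1 ≤ d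
    · rw [show keepStep d acc p = acc ++ [if p.1 > p.2 then (p.2, p.1) else (p.1, p.2)] from by
        unfold keepStep; rw [if_pos hd]]
      rw [ih]
      simp only [keptL, List.filterMap_cons, if_pos hd]
      simp
    · rw [show keepStep d acc p = acc from by unfold keepStep; rw [if_neg hd]]
      rw [ih]
      simp only [keptL, List.filterMap_cons, if_neg hd]

lemma popE_spec : ∀ (l : List Int) (t c : Int), l.Pairwise (· ≤ ·) →
    popE l t c = (l.filter (fun x => !decide (x ≤ t)), c + (l.countP (fun x => decide (x ≤ t)) : Int)) := by
  intro l
  induction l with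
  | nil => intro t c _; simp [popE]
  | cons x xs ih =>
    intro t c hp
    rcases List.pairwise_cons.mp hp with ⟨hx, hxs⟩
    by_cases h : x ≤ t
    · rw [popE, if_pos h, ih t (c + 1) hxs]
      simp [List.countP_cons, h]
      push_cast; ring
    · rw [popE, if_neg h]
      have hall : ∀ y ∈ x :: xs, ¬ (y ≤ t) := by
        intro y hy
        rcases List.mem_cons.mp hy with h' | h'
        · omega
        · have := hx y h'; omega
      have h1 : List.filter (fun x => !decide (x ≤ t)) (x :: xs) = x :: xs := by
        rw [List.filter_eq_self]; intro y hy; simp [hall y hy]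
      have h2 : List.countP (fun x => decide (x ≤ t)) (x :: xs) = 0 := by
        rw [List.countP_eq_zero]; intro y hy; simp [hall y hy]
      rw [h1, h2]; simp

lemma popS_spec : ∀ (l : List Int) (t c : Int), l.Pairwise (· ≤ ·) →
    popS l t c = (l.filter (fun x => !decide (x < t)), c - (l.countP (fun x => decide (x < t)) : Int)) := by
  intro l
  induction l with
  | nil => intro t c _; simp [popS]
  | cons x xs ih =>
    intro t c hp
    rcases List.pairwise_cons.mp hp with ⟨hx, hxs⟩
    by_cases h : x < t
    · rw [popS, if_pos h, ih t (c - 1) hxs]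
      simp [List.countP_cons, h]
      push_cast; ring
    · rw [popS, if_neg h]
      have hall : ∀ y ∈ x :: xs, ¬ (y < t) := by
        intro y hy
        rcases List.mem_cons.mp hy with h' | h'
        · omega
        · have := hx y h'; omega
      have h1 : List.filter (fun x => !decide (x < t)) (x :: xs) = x :: xs := by
        rw [List.filter_eq_self]; intro y hy; simp [hall y hy]
      have h2 : List.countP (fun x => decide (x < t)) (x :: xs) = 0 := by
        rw [List.countP_eq_zero]; intro y hy; simp [hall y hy]
      rw [h1, h2]; simp

lemma countP_split (l : List Int) (p q : Int → Bool) (h : ∀ x ∈ l, q x = true → p x = true) :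
    l.countP p = l.countP q + l.countP (fun x => p x && !q x) := by
  induction l with
  | nil => simp
  | cons x xs ih =>
    have hx := h x (by simp)
    have ihx := ih (fun y hy => h y (List.mem_cons_of_mem _ hy))
    simp only [List.countP_cons]
    cases hq : q x <;> cases hp : p x <;> simp_all <;> omega

-- the sweep value at a position
def fval (S E : List Int) (d pos : Int) : Int :=
  (E.countP (fun x => decide (x ≤ pos + d)) : Int) - (S.countP (fun x => decide (x < pos)) : Int)

lemma loopA (d : Int) : ∀ (rest S E : List Int) (ts te ans : Int),
    S.Pairwise (· ≤ ·) → E.Pairwise (· ≤ ·) → rest.Pairwise (· ≤ ·) →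
    (∀ x ∈ rest, ts ≤ x) → (∀ x ∈ rest, te ≤ x + d) →
    (rest.foldl (stepA d)
      (S.filter (fun x => !decide (x < ts)), E.filter (fun x => !decide (x ≤ te)), ans,
       (E.countP (fun x => decide (x ≤ te)) : Int) - (S.countP (fun x => decide (x < ts)) : Int))).2.2.1
    = rest.foldl (fun a pos => max a (fval S E d pos)) ans := by
  intro rest
  induction rest with
  | nil => intro S E ts te ans _ _ _ _ _; rfl
  | cons pos rest' ih =>
    intro S E ts te ans hS hE hrest hts hte
    rcases List.pairwise_cons.mp hrest with ⟨hhead, hrest'⟩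
    have hts_pos : ts ≤ pos := hts pos (by simp)
    have hte_pos : te ≤ pos + d := hte pos (by simp)
    simp only [List.foldl_cons]
    have hstep : stepA d
        (S.filter (fun x => !decide (x < ts)), E.filter (fun x => !decide (x ≤ te)), ans,
         (E.countP (fun x => decide (x ≤ te)) : Int) - (S.countP (fun x => decide (x < ts)) : Int)) pos
        = (S.filter (fun x => !decide (x < pos)), E.filter (fun x => !decide (x ≤ pos + d)),
           max ans (fval S E d pos), fval S E d pos) := by
      rw [stepA]
      rw [popE_spec _ _ _ (hE.filter _), popS_spec _ _ _ (hS.filter _)]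
      have hEf : (E.filter (fun x => !decide (x ≤ te))).filter (fun x => !decide (x ≤ pos + d))
          = E.filter (fun x => !decide (x ≤ pos + d)) := by
        rw [List.filter_filter]
        apply List.filter_congr
        intro x _
        by_cases h1 : x ≤ pos + d <;> by_cases h2 : x ≤ te <;> simp [h1, h2] <;> omega
      have hSf : (S.filter (fun x => !decide (x < ts))).filter (fun x => !decide (x < pos))
          = S.filter (fun x => !decide (x < pos)) := by
        rw [List.filter_filter]
        apply List.filter_congr
        intro x _
        by_cases h1 : x < pos <;> by_cases h2 : x < ts <;> simp [h1, h2] <;> omega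
      have hEc : ((E.filter (fun x => !decide (x ≤ te))).countP (fun x => decide (x ≤ pos + d)) : Int)
          = (E.countP (fun x => decide (x ≤ pos + d)) : Int) - (E.countP (fun x => decide (x ≤ te)) : Int) := by
        have h1 : (E.filter (fun x => !decide (x ≤ te))).countP (fun x => decide (x ≤ pos + d))
            = E.countP (fun x => decide (x ≤ pos + d) && !decide (x ≤ te)) := by
          rw [List.countP_filter]
        have h2 : E.countP (fun x => decide (x ≤ pos + d))
            = E.countP (fun x => decide (x ≤ te)) + E.countP (fun x => decide (x ≤ pos + d) && !decide (x ≤ te)) :=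
          countP_split E _ _ (by intro x _ hx; simp at hx ⊢; omega)
        rw [h1]; omega
      have hSc : ((S.filter (fun x => !decide (x < ts))).countP (fun x => decide (x < pos)) : Int)
          = (S.countP (fun x => decide (x < pos)) : Int) - (S.countP (fun x => decide (x < ts)) : Int) := by
        have h1 : (S.filter (fun x => !decide (x < ts))).countP (fun x => decide (x < pos))
            = S.countP (fun x => decide (x < pos) && !decide (x < ts)) := by
          rw [List.countP_filter]
        have h2 : S.countP (fun x => decide (x < pos))
            = S.countP (fun x => decide (x < ts)) + S.countP (fun x => decide (x < pos) && !decide (x < ts)) :=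
          countP_split S _ _ (by intro x _ hx; simp at hx ⊢; omega)
        rw [h1]; omega
      simp only [hEf, hSf, hEc, hSc, fval]
      refine Prod.ext ?_ (Prod.ext ?_ (Prod.ext ?_ ?_)) <;> simp <;> ring_nf
    rw [hstep]
    exact ih S E pos (pos + d) (max ans (fval S E d pos)) hS hE hrest'
      (fun x hx => hhead x hx) (fun x hx => by have := hhead x hx; omega)

-- fval over the kept list equals the contained count
lemma fval_eq_gcount (L : List (Int × Int)) (d : Int)
    (h : ∀ q ∈ L, q.1 ≤ q.2 ∧ q.2 - q.1 ≤ d) (pos : Int) :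
    fval (L.map Prod.fst) (L.map Prod.snd) d pos = gcount L d pos := by
  induction L with
  | nil => simp [fval, gcount]
  | cons q Lt ih =>
    have hq := h q (by simp)
    have ihh := ih (fun r hr => h r (List.mem_cons_of_mem _ hr))
    simp only [fval, gcount, List.map_cons, List.countP_cons, decide_eq_true_eq] at ihh ⊢
    split_ifs <;> push_cast at ihh ⊢ <;> omega

lemma innerB (d : Int) (q : Int × Int) : ∀ (kept : List (Int × Int)) (c0 : Int),
    kept.foldl (fun (c : Int) q2 => if q.1 ≤ q2.1 ∧ q2.2 ≤ q.1 + d then c + 1 else c) c0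
      = c0 + gcount kept d q.1 := by
  intro kept
  induction kept with
  | nil => intro c0; simp [gcount]
  | cons q2 rest ih =>
    intro c0
    simp only [List.foldl_cons, gcount, List.countP_cons]
    by_cases h : q.1 ≤ q2.1 ∧ q2.2 ≤ q.1 + d <;> simp [h, ih, gcount] <;> push_cast <;> ring

lemma foldl_max_init_le {α : Type} (v : α → Int) : ∀ (l : List α) (a : Int),
    a ≤ l.foldl (fun b x => max b (v x)) a := by
  intro l
  induction l with
  | nil => intro a; simp
  | cons x xs ih => intro a; exact le_trans (le_max_left a (v x)) (ih _)

lemma foldl_max_mem_le {α : Type} (v : α → Int) : ∀ (l : List α) (a : Int) (x : α), x ∈ l →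
    v x ≤ l.foldl (fun b x => max b (v x)) a := by
  intro l
  induction l with
  | nil => intro a x hx; simp at hx
  | cons y ys ih =>
    intro a x hx
    rcases List.mem_cons.mp hx with h | h
    · subst h; exact le_trans (le_max_right a (v x)) (foldl_max_init_le v ys _)
    · exact ih _ x h

lemma foldl_max_le {α : Type} (v : α → Int) (c : Int) : ∀ (l : List α) (a : Int),
    a ≤ c → (∀ x ∈ l, v x ≤ c) → l.foldl (fun b x => max b (v x)) a ≤ c := by
  intro l
  induction l with
  | nil => intro a ha _; simpa
  | cons y ys ih =>
    intro a ha hall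
    exact ih _ (max_le ha (hall y (by simp))) (fun x hx => hall x (List.mem_cons_of_mem _ hx))

lemma exists_min_fst : ∀ (M : List (Int × Int)), M ≠ [] → ∃ m ∈ M, ∀ q ∈ M, m.1 ≤ q.1 := by
  intro M
  induction M with
  | nil => intro h; exact absurd rfl h
  | cons q rest ih =>
    intro _
    rcases rest with _ | ⟨r, rs⟩
    · exact ⟨q, by simp, by simp⟩
    · rcases ih (by simp) with ⟨m, hm, hmin⟩
      by_cases h : q.1 ≤ m.1
      · refine ⟨q, by simp, ?_⟩
        intro r hr
        rcases List.mem_cons.mp hr with h' | h'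
        · subst h'; omega
        · exact le_trans h (hmin r h')
      · exact ⟨m, List.mem_cons_of_mem _ hm, fun r hr => by
          rcases List.mem_cons.mp hr with h' | h'
          · subst h'; omega
          · exact hmin r h'⟩

lemma foldl_fun_congr {α β : Type} (f g : β → α → β) (h : ∀ b a, f b a = g b a) :
    ∀ (l : List α) (b : β), l.foldl f b = l.foldl g b := by
  intro l
  induction l with
  | nil => intro b; rfl
  | cons x xs ih => intro b; rw [List.foldl_cons, List.foldl_cons, h, ih]

lemma max_ite (c b : Int) : (if c > b then c else b) = max b c := by
  split_ifs with h
  · exact (max_eq_right h.le).symm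
  · exact (max_eq_left (by omega)).symm

lemma A_char (n : Int) (pairs : List (Int × Int)) (d : Int) :
    solution n pairs d =
      (PySem.List.sorted ((keptL pairs d).flatMap fun q => [q.1, q.2]) (fun x => x) false).foldl
        (fun a pos => max a (gcount (keptL pairs d) d pos)) 0 := by
  unfold solution
  rw [buildA d pairs [] [] []]
  simp only [List.nil_append]
  set kept := keptL pairs d with hkept
  set P := kept.flatMap (fun q => [q.1, q.2]) with hP
  set S := PySem.List.sorted (kept.map Prod.fst) (fun x => x) false with hS
  set E := PySem.List.sorted (kept.map Prod.snd) (fun x => x) false with hE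
  rcases hcase : PySem.List.sorted P (fun x => x) false with _ | ⟨p0, t⟩
  · rfl
  · have hPne : P ≠ [] := by
      intro h0
      have h1 := (PySem.List.sorted_eq_nil_iff P (fun x => x) false).mpr h0
      rw [h1] at hcase
      exact List.cons_ne_nil p0 t hcase.symm
    have hkne : kept ≠ [] := by
      intro h0; apply hPne; rw [hP, h0]; rfl
    obtain ⟨q0, hq0⟩ := List.exists_mem_of_ne_nil _ hkne
    have hq0' : q0 ∈ keptL pairs d := by rw [hkept] at hq0; exact hq0
    have hq0p := mem_keptL hq0'
    have hd0 : 0 ≤ d := by omega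
    have hmemP : ∀ y ∈ PySem.List.sorted P (fun x => x) false, y ∈ P :=
      fun y hy => (PySem.List.mem_sorted _ _ _ y).mp hy
    have hmin : ∀ y ∈ P, p0 ≤ y := PySem.List.key_head_sorted_le P (fun x => x) hcase
    have hSP : ∀ x ∈ S, p0 ≤ x := by
      intro x hx
      have hx' : x ∈ kept.map Prod.fst := (PySem.List.mem_sorted _ _ _ x).mp hx
      rcases List.mem_map.mp hx' with ⟨q, hq, hqx⟩
      exact hmin x (List.mem_flatMap.mpr ⟨q, hq, by simp [← hqx]⟩)
    have hEP : ∀ x ∈ E, p0 ≤ x := by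
      intro x hx
      have hx' : x ∈ kept.map Prod.snd := (PySem.List.mem_sorted _ _ _ x).mp hx
      rcases List.mem_map.mp hx' with ⟨q, hq, hqx⟩
      exact hmin x (List.mem_flatMap.mpr ⟨q, hq, by simp [← hqx]⟩)
    have hSfull : S.filter (fun x => !decide (x < p0)) = S :=
      List.filter_eq_self.mpr (fun x hx => by have := hSP x hx; simp; omega)
    have hEfull : E.filter (fun x => !decide (x ≤ p0 - 1)) = E :=
      List.filter_eq_self.mpr (fun x hx => by have := hEP x hx; simp; omega)
    have hcS : S.countP (fun x => decide (x < p0)) = 0 :=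
      List.countP_eq_zero.mpr (fun x hx => by have := hSP x hx; simp; omega)
    have hcE : E.countP (fun x => decide (x ≤ p0 - 1)) = 0 :=
      List.countP_eq_zero.mpr (fun x hx => by have := hEP x hx; simp; omega)
    have hinit : (S, E, (0 : Int), (0 : Int))
        = (S.filter (fun x => !decide (x < p0)), E.filter (fun x => !decide (x ≤ p0 - 1)), (0 : Int),
           (E.countP (fun x => decide (x ≤ p0 - 1)) : Int) - (S.countP (fun x => decide (x < p0)) : Int)) := by
      rw [hSfull, hEfull, hcS, hcE]; norm_num
    rw [hinit, ← hcase]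
    have hSsorted : S.Pairwise (· ≤ ·) := by
      simpa using PySem.List.sorted_pairwise (kept.map Prod.fst) (fun x => x)
    have hEsorted : E.Pairwise (· ≤ ·) := by
      simpa using PySem.List.sorted_pairwise (kept.map Prod.snd) (fun x => x)
    have hPsorted : (PySem.List.sorted P (fun x => x) false).Pairwise (· ≤ ·) := by
      simpa using PySem.List.sorted_pairwise P (fun x => x)
    rw [loopA d (PySem.List.sorted P (fun x => x) false) S E p0 (p0 - 1) 0 hSsorted hEsorted hPsorted
      (fun x hx => hmin x (hmemP x hx)) (fun x hx => by have := hmin x (hmemP x hx); omega)]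
    have hfg : ∀ pos, fval S E d pos = gcount kept d pos := by
      intro pos
      have hpS : S.Perm (kept.map Prod.fst) := PySem.List.sorted_perm _ _ _
      have hpE : E.Perm (kept.map Prod.snd) := PySem.List.sorted_perm _ _ _
      have : fval S E d pos = fval (kept.map Prod.fst) (kept.map Prod.snd) d pos := by
        unfold fval; rw [hpS.countP_eq, hpE.countP_eq]
      rw [this]
      exact fval_eq_gcount kept d (fun q hq => mem_keptL (by rw [hkept] at hq; exact hq)) pos
    exact foldl_fun_congr _ _ (fun a pos => by rw [hfg]) _ _

lemma B_char (n : Int) (pairs : List (Int × Int)) (d : Int) :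
    solution_alt n pairs d
      = (keptL pairs d).foldl (fun best q => max best (gcount (keptL pairs d) d q.1)) 0 := by
  unfold solution_alt
  rw [buildB d pairs []]
  simp only [List.nil_append]
  apply foldl_fun_congr
  intro best q
  show (if ((keptL pairs d).foldl
      (fun (c : Int) q2 => if q.1 ≤ q2.1 ∧ q2.2 ≤ q.1 + d then c + 1 else c) 0) > best
    then ((keptL pairs d).foldl
      (fun (c : Int) q2 => if q.1 ≤ q2.1 ∧ q2.2 ≤ q.1 + d then c + 1 else c) 0) else best)
    = max best (gcount (keptL pairs d) d q.1)
  rw [innerB d q (keptL pairs d) 0, zero_add, max_ite]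

-- ===== VERDICT (by name: the statement is the Claim_ definition above) =====
set_option maxHeartbeats 1600000 in
theorem solution_spec : Claim_equal_solution := by
  intro n pairs d _
  show solution n pairs d = solution_alt n pairs d
  rw [A_char n pairs d, B_char n pairs d]
  set kept := keptL pairs d with hkept
  set P := kept.flatMap (fun q => [q.1, q.2]) with hP
  apply le_antisymm
  · apply foldl_max_le (fun pos => gcount kept d pos)
    · exact foldl_max_init_le _ _ _
    · intro pos hpos
      by_cases hc : kept.countP (fun q => decide (pos ≤ q.1 ∧ q.2 ≤ pos + d)) = 0
      · have : gcount kept d pos = 0 := by unfold gcount; rw [hc]; rfl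
        rw [this]
        exact foldl_max_init_le _ _ _
      · have hCne : kept.filter (fun q => decide (pos ≤ q.1 ∧ q.2 ≤ pos + d)) ≠ [] := by
          intro h0
          rw [List.countP_eq_length_filter, h0] at hc
          exact hc rfl
        obtain ⟨m, hmC, hmmin⟩ := exists_min_fst _ hCne
        have hmkept : m ∈ kept := List.mem_of_mem_filter hmC
        have hmpred : pos ≤ m.1 ∧ m.2 ≤ pos + d := by
          have := List.of_mem_filter hmC; simpa using this
        have hmono : kept.countP (fun q => decide (pos ≤ q.1 ∧ q.2 ≤ pos + d))
            ≤ kept.countP (fun q => decide (m.1 ≤ q.1 ∧ q.2 ≤ m.1 + d)) := by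
          apply List.countP_mono_left
          intro q hq hqp
          simp only [decide_eq_true_eq] at hqp ⊢
          have hqC : q ∈ kept.filter (fun q => decide (pos ≤ q.1 ∧ q.2 ≤ pos + d)) :=
            List.mem_filter.mpr ⟨hq, by simpa using hqp⟩
          have := hmmin q hqC
          exact ⟨this, by omega⟩
        have h1 : gcount kept d pos ≤ gcount kept d m.1 := by
          unfold gcount; exact_mod_cast hmono
        exact le_trans h1 (foldl_max_mem_le (fun q => gcount kept d q.1) kept 0 m hmkept)
  · apply foldl_max_le (fun q : Int × Int => gcount kept d q.1)
    · exact foldl_max_init_le _ _ _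
    · intro q hq
      have hqP : q.1 ∈ P := List.mem_flatMap.mpr ⟨q, hq, by simp⟩
      have hmem : q.1 ∈ PySem.List.sorted P (fun x => x) false :=
        (PySem.List.mem_sorted _ _ _ _).mpr hqP
      exact foldl_max_mem_le (fun pos => gcount kept d pos) _ 0 _ hmem
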